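-- pv_equiv track=rewrite | github.com/Carath/Advent-of-Code | 2021/AoC_2021_23.py | buildAbestPath
-- ===== SOURCE A (Python) =====
-- def buildAbestPath(statesMap, path=[]):
-- 	if path == []:
-- 		assert () in statesMap, 'Final state has never been reached!'
-- 		path = [(statesMap[()][0], ())] # final state
-- 	currKey, predCostKey = path[-1][1], None
-- 	for key in statesMap:
-- 		if currKey in statesMap[key][1]:
-- 			predCost = statesMap[key][0]
-- 			moveCost = statesMap[key][1][currKey]
-- 			currCost = statesMap[currKey][0]
-- 			if predCost + moveCost == currCost:
-- 				predCostKey = (predCost, key)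
-- 				break
-- 	if predCostKey == None:
-- 		path.reverse()
-- 		return path
-- 	path.append(predCostKey)
-- 	return buildAbestPath(statesMap, path)
-- ===== SOURCE B (Python) =====
-- # Return-value equivalent to A (A reverses/appends to the caller's path list in
-- # place; B never mutates its arguments). B precomputes the reverse adjacency
-- # once, then follows it; like A it raises KeyError when the path's last state
-- # has incoming edges but is missing from statesMap.
-- def buildAbestPath(statesMap, path=[]):
-- 	if path == []:
-- 		assert () in statesMap, 'Final state has never been reached!'
-- 		path = [(statesMap[()][0], ())]
-- 	# Reverse adjacency built once: state -> incoming edges (cost, key, moveCost)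
-- 	# in map iteration order.
-- 	preds = {}
-- 	for key in statesMap:
-- 		cost, moves = statesMap[key][0], statesMap[key][1]
-- 		for nk, mc in moves.items():
-- 			preds.setdefault(nk, []).append((cost, key, mc))
-- 	chain = []
-- 	curr = path[-1][1]
-- 	while True:
-- 		step = _predStep(preds, statesMap, curr)
-- 		if step is None:
-- 			break
-- 		chain.append(step)
-- 		curr = step[1]
-- 	return list(reversed(chain)) + list(reversed(path))
--
-- def _predStep(preds, statesMap, curr):
-- 	cands = preds.get(curr, [])
-- 	if not cands:
-- 		return None
-- 	currCost = statesMap[curr][0]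
-- 	for cost, key, mc in cands:
-- 		if cost + mc == currCost:
-- 			return (cost, key)
-- 	return None
-- ===== Notes on version B (the rewrite author's own statement) =====
-- stated objective: alternative
-- what changed: A rescans the whole map per path step (linear search for a cost-matching predecessor, then recurses); B precomputes the reverse-adjacency map (state -> incoming edges in map order) in one pass and then walks it, checking only the current state's incoming edges per step, without mutating the caller's path.
import Mathlib
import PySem

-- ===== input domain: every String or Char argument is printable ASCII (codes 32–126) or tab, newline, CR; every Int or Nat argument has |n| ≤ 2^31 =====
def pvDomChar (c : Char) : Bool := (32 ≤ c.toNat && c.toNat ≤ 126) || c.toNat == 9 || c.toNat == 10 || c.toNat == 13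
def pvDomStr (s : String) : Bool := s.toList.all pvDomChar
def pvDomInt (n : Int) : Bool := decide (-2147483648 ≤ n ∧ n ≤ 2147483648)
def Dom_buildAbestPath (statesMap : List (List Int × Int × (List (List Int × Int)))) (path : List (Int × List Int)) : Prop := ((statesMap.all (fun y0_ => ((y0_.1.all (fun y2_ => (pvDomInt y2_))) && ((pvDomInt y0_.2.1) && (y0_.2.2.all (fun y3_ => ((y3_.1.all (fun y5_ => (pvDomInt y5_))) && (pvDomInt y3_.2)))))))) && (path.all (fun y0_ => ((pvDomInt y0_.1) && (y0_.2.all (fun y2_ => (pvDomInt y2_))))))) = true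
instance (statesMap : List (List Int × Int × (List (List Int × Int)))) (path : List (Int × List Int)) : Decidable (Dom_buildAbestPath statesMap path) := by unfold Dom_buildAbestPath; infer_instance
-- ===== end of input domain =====

-- B replaces A's per-step rescan of the whole map by one precomputed reverse-adjacency
-- map (state -> incoming edges in map order) walked one step at a time; equivalence is
-- about the RETURN value only (the Python A reverses/appends to the caller's path list
-- in place, B does not).

-- ===== PORT A =====
-- Python dict lookup on an association list (first match).
def pvLookA (adj : List (List Int × Int)) (k : List Int) : Option Int :=
  match adj with
  | [] => none
  | (k', v) :: rest => if k' = k then some v else pvLookA rest k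

def pvLookSM (sm : List (List Int × Int × (List (List Int × Int)))) (k : List Int) :
    Option (Int × List (List Int × Int)) :=
  match sm with
  | [] => none
  | (k', v) :: rest => if k' = k then some v else pvLookSM rest k

-- A's `for key in statesMap: … break` scan; where Python raises KeyError
-- (currKey seen in an adjacency but absent from the map) this returns none —
-- such inputs are excluded by Pre_.
def aScan (sm full : List (List Int × Int × (List (List Int × Int)))) (ck : List Int) :
    Option (Int × List Int) :=
  match sm with
  | [] => none
  | (k, c, adj) :: rest =>
    match pvLookA adj ck with
    | none => aScan rest full ck
    | some mc =>
      match pvLookSM full ck with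
      | none => none
      | some cv => if c + mc = cv.1 then some (c, k) else aScan rest full ck

-- A's tail recursion; the fuel only makes the same computation total and is
-- never exhausted on inputs satisfying Pre_.
def aLoop (sm : List (List Int × Int × (List (List Int × Int)))) :
    Nat → List (Int × List Int) → List (Int × List Int)
  | 0, path => path.reverse
  | fuel + 1, path =>
    match path.getLast? with
    | none => path.reverse
    | some q =>
      match aScan sm sm q.2 with
      | none => path.reverse
      | some p => aLoop sm fuel (path ++ [p])

def buildAbestPath (statesMap : List (List Int × Int × (List (List Int × Int)))) (path : List (Int × List Int)) : List (Int × List Int) :=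
  let path0 := if path = [] then
      (match pvLookSM statesMap [] with
       | some v => [(v.1, ([] : List Int))]
       | none => [])   -- Python raises AssertionError here; outside Pre_
    else path
  aLoop statesMap (statesMap.length + 1) path0

-- ===== PORT B =====
-- preds.get(curr, []) on the reverse-adjacency association list.
def pvLookD (P : List (List Int × List (Int × List Int × Int))) (k : List Int) :
    List (Int × List Int × Int) :=
  match P with
  | [] => []
  | (k', v) :: rest => if k' = k then v else pvLookD rest k

-- preds.setdefault(nk, []).append(e): append to the existing entry in place,
-- else add the key at the end.
def predAdd : List (List Int × List (Int × List Int × Int)) → List Int →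
    (Int × List Int × Int) → List (List Int × List (Int × List Int × Int))
  | [], nk, e => [(nk, [e])]
  | (k, vs) :: rest, nk, e =>
    if k = nk then (k, vs ++ [e]) :: rest else (k, vs) :: predAdd rest nk e

-- inner `for nk, mc in moves.items()` loop of Source B.
def bEdges (c : Int) (k : List Int) :
    List (List Int × Int) → List (List Int × List (Int × List Int × Int)) →
    List (List Int × List (Int × List Int × Int))
  | [], P => P
  | (nk, mc) :: rest, P => bEdges c k rest (predAdd P nk (c, k, mc))

-- outer `for key in statesMap` loop of Source B building preds.
def bPredGo : List (List Int × Int × (List (List Int × Int))) →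
    List (List Int × List (Int × List Int × Int)) →
    List (List Int × List (Int × List Int × Int))
  | [], P => P
  | (k, c, adj) :: rest, P => bPredGo rest (bEdges c k adj P)

-- the `for cost, key, mc in cands` loop of _predStep.
def firstMatch : List (Int × List Int × Int) → Int → Option (Int × List Int)
  | [], _ => none
  | (c, k, mc) :: rest, cc => if c + mc = cc then some (c, k) else firstMatch rest cc

-- Source B's _predStep; where Python raises KeyError (cands nonempty, curr absent
-- from statesMap) this returns none — such inputs are excluded by Pre_.
def bStep (pred : List (List Int × List (Int × List Int × Int)))
    (sm : List (List Int × Int × (List (List Int × Int)))) (ck : List Int) :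
    Option (Int × List Int) :=
  let cands := pvLookD pred ck
  if cands = [] then none
  else
    match pvLookSM sm ck with
    | none => none
    | some cv => firstMatch cands cv.1

-- Source B's `while True` loop; the fuel only makes it total, never exhausted inside Pre_.
def bChain (pred : List (List Int × List (Int × List Int × Int)))
    (sm : List (List Int × Int × (List (List Int × Int)))) :
    Nat → List Int → List (Int × List Int)
  | 0, _ => []
  | fuel + 1, ck =>
    match bStep pred sm ck with
    | none => []
    | some p => p :: bChain pred sm fuel p.2

def buildAbestPath_alt (statesMap : List (List Int × Int × (List (List Int × Int)))) (path : List (Int × List Int)) : List (Int × List Int) :=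
  let path0 := if path = [] then
      (match pvLookSM statesMap [] with
       | some v => [(v.1, ([] : List Int))]
       | none => [])   -- Python raises AssertionError here; outside Pre_
    else path
  let preds := bPredGo statesMap []
  match path0.getLast? with
  | none => []
  | some q => (bChain preds statesMap (statesMap.length + 1) q.2).reverse ++ path0.reverse

-- ===== PRECONDITION & SPEC =====
-- Pre_ excludes inputs on which the Python A raises (empty path with no final
-- state (), an AssertionError; an initial key that occurs as a neighbour but is
-- absent from the map, a KeyError — B raises it too) or on which both programs
-- run without bound (a cost-matching edge of non-positive cost), and
-- association lists with duplicate dict keys, which no Python dict input produces.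
def Pre_buildAbestPath (statesMap : List (List Int × Int × (List (List Int × Int)))) (path : List (Int × List Int)) : Prop :=
  (path = [] → ∃ e ∈ statesMap, e.1 = ([] : List Int)) ∧
  (statesMap.map Prod.fst).Nodup ∧
  (∀ e ∈ statesMap, ((e.2.2).map Prod.fst).Nodup) ∧
  (∀ e ∈ statesMap, ∀ p ∈ e.2.2, ∀ e' ∈ statesMap, e'.1 = p.1 → e.2.1 + p.2 = e'.2.1 → 0 < p.2) ∧
  (∀ q ∈ path.getLast?.toList, (∃ e ∈ statesMap, ∃ p ∈ e.2.2, p.1 = q.2) → ∃ e ∈ statesMap, e.1 = q.2)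
instance (statesMap : List (List Int × Int × (List (List Int × Int)))) (path : List (Int × List Int)) : Decidable (Pre_buildAbestPath statesMap path) := by unfold Pre_buildAbestPath; infer_instance

def pvWitness_buildAbestPath : (List (List Int × Int × (List (List Int × Int)))) × (List (Int × List Int)) :=
  ([([], 0, [])], [])

def Spec_buildAbestPath (statesMap : List (List Int × Int × (List (List Int × Int)))) (path : List (Int × List Int)) (out : List (Int × List Int)) : Prop := out = buildAbestPath_alt statesMap path
instance (statesMap : List (List Int × Int × (List (List Int × Int)))) (path : List (Int × List Int)) (out : List (Int × List Int)) : Decidable (Spec_buildAbestPath statesMap path out) := by unfold Spec_buildAbestPath; infer_instance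

-- ===== CLAIM (what is proved, stated in full; the proofs are below) =====
def Claim_equal_buildAbestPath : Prop := ∀ (statesMap : List (List Int × Int × (List (List Int × Int)))) (path : List (Int × List Int)), Dom_buildAbestPath statesMap path → Pre_buildAbestPath statesMap path → Spec_buildAbestPath statesMap path (buildAbestPath statesMap path)

-- ===== LEMMAS AND PROOFS =====

-- the incoming edges of ck contributed by the entries of L, in map order
def candsOf (L : List (List Int × Int × (List (List Int × Int)))) (ck : List Int) :
    List (Int × List Int × Int) :=
  L.flatMap (fun e =>
    (e.2.2).filterMap (fun p => if p.1 = ck then some (e.2.1, e.1, p.2) else none))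

theorem lookD_predAdd (P : List (List Int × List (Int × List Int × Int)))
    (nk : List Int) (e : Int × List Int × Int) (ck : List Int) :
    pvLookD (predAdd P nk e) ck =
      pvLookD P ck ++ (if nk = ck then [e] else []) := by
  induction P with
  | nil => by_cases h : nk = ck <;> simp [predAdd, pvLookD, h]
  | cons hd t ih =>
    obtain ⟨k, vs⟩ := hd
    by_cases h1 : k = nk
    · subst h1
      by_cases h2 : k = ck <;> simp [predAdd, pvLookD, h2]
    · by_cases h2 : k = ck
      · subst h2
        have : ¬ nk = k := fun h => h1 h.symm
        simp [predAdd, h1, pvLookD, this]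
      · simp [predAdd, h1, pvLookD, h2, ih]

theorem lookD_bEdges (c : Int) (k : List Int) (adj : List (List Int × Int))
    (P : List (List Int × List (Int × List Int × Int))) (ck : List Int) :
    pvLookD (bEdges c k adj P) ck =
      pvLookD P ck ++
        adj.filterMap (fun p => if p.1 = ck then some (c, k, p.2) else none) := by
  induction adj generalizing P with
  | nil => simp [bEdges]
  | cons p rest ih =>
    obtain ⟨nk, mc⟩ := p
    simp only [bEdges]
    rw [ih, lookD_predAdd]
    by_cases h : nk = ck <;> simp [h]

theorem lookD_bPredGo (L : List (List Int × Int × (List (List Int × Int))))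
    (P : List (List Int × List (Int × List Int × Int))) (ck : List Int) :
    pvLookD (bPredGo L P) ck = pvLookD P ck ++ candsOf L ck := by
  induction L generalizing P with
  | nil => simp [bPredGo, candsOf]
  | cons e rest ih =>
    obtain ⟨k, c, adj⟩ := e
    simp only [bPredGo]
    rw [ih, lookD_bEdges]
    simp [candsOf]

-- with distinct adjacency keys, the filterMap contribution is the dict lookup
theorem filterMap_eq_lookA (c : Int) (k : List Int) (adj : List (List Int × Int))
    (ck : List Int) (hnd : (adj.map Prod.fst).Nodup) :
    adj.filterMap (fun p => if p.1 = ck then some (c, k, p.2) else none) =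
      match pvLookA adj ck with
      | some mc => [(c, k, mc)]
      | none => [] := by
  induction adj with
  | nil => rfl
  | cons p rest ih =>
    obtain ⟨nk, mc⟩ := p
    simp only [List.map_cons, List.nodup_cons] at hnd
    obtain ⟨hnot, hrest⟩ := hnd
    by_cases h : nk = ck
    · subst h
      have hrl : rest.filterMap (fun p => if p.1 = nk then some (c, k, p.2) else none) = [] := by
        rw [ih hrest]
        have : pvLookA rest nk = none := by
          clear ih
          induction rest with
          | nil => rfl
          | cons q t ihq =>
            simp only [List.map_cons, List.mem_cons, not_or] at hnot hrest
            have : ¬ q.1 = nk := fun he => hnot.1 he.symm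
            simp only [List.nodup_cons] at *
            simp [pvLookA, this, ihq (fun h => hnot.2 h) hrest.2]
        simp [this]
      simp [pvLookA, hrl]
    · simp [pvLookA, h, ih hrest]

-- A's scan, characterised by the candidate list
theorem aScan_eq_cands (L full : List (List Int × Int × (List (List Int × Int))))
    (ck : List Int) (hnd : ∀ e ∈ L, ((e.2.2).map Prod.fst).Nodup) :
    aScan L full ck =
      if candsOf L ck = [] then none
      else
        match pvLookSM full ck with
        | none => none
        | some cv => firstMatch (candsOf L ck) cv.1 := by
  induction L with
  | nil => simp [aScan, candsOf]
  | cons e rest ih =>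
    obtain ⟨k, c, adj⟩ := e
    have hadj : (adj.map Prod.fst).Nodup := hnd _ (List.mem_cons_self ..)
    have hrest : ∀ e ∈ rest, ((e.2.2).map Prod.fst).Nodup :=
      fun e he => hnd e (List.mem_cons_of_mem _ he)
    have hc : candsOf ((k, c, adj) :: rest) ck =
        (match pvLookA adj ck with
         | some mc => [(c, k, mc)]
         | none => []) ++ candsOf rest ck := by
      simp only [candsOf, List.flatMap_cons]
      rw [filterMap_eq_lookA c k adj ck hadj]
    rw [hc]
    cases hA : pvLookA adj ck with
    | none =>
      simp only [aScan, hA]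
      rw [ih hrest]
      simp
    | some mc =>
      cases hS : pvLookSM full ck with
      | none => simp [aScan, hA, hS]
      | some cv =>
        by_cases heq : c + mc = cv.1
        · simp [aScan, hA, hS, heq, firstMatch]
        · simp only [aScan, hA, hS, if_neg heq]
          rw [ih hrest]
          cases hcr : candsOf rest ck with
          | nil => simp [firstMatch, heq]
          | cons x xs => simp [hS, firstMatch, heq]

-- the two loops agree step for step when the step functions agree
theorem aLoop_eq (sm : List (List Int × Int × (List (List Int × Int))))
    (pred : List (List Int × List (Int × List Int × Int)))
    (H : ∀ ck, aScan sm sm ck = bStep pred sm ck) :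
    ∀ (fuel : Nat) (path : List (Int × List Int)) (q : Int × List Int),
      path.getLast? = some q →
      aLoop sm fuel path = (bChain pred sm fuel q.2).reverse ++ path.reverse := by
  intro fuel
  induction fuel with
  | zero => intro path q _; simp [aLoop, bChain]
  | succ fuel ih =>
    intro path q hq
    simp only [aLoop, hq, H q.2, bChain]
    cases hP : bStep pred sm q.2 with
    | none => simp
    | some p =>
      have hlast : (path ++ [p]).getLast? = some p := by simp
      show aLoop sm fuel (path ++ [p]) = (p :: bChain pred sm fuel p.2).reverse ++ path.reverse
      rw [ih _ _ hlast]
      simp [List.reverse_append]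

-- ===== VERDICT (by name: the statement is the Claim_ definition above) =====
theorem buildAbestPath_spec : Claim_equal_buildAbestPath := by
  intro sm path _ hpre
  obtain ⟨_, _, hnd, _, _⟩ := hpre
  unfold Spec_buildAbestPath buildAbestPath buildAbestPath_alt
  have H : ∀ ck, aScan sm sm ck = bStep (bPredGo sm []) sm ck := by
    intro ck
    rw [aScan_eq_cands sm sm ck hnd]
    unfold bStep
    rw [lookD_bPredGo sm [] ck]
    simp [pvLookD]
  set path0 := if path = [] then
      (match pvLookSM sm [] with
       | some v => [(v.1, ([] : List Int))]
       | none => [])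
    else path with hpath0
  cases hlast : path0.getLast? with
  | none =>
    have : path0 = [] := by simpa using hlast
    simp [this, aLoop]
  | some q =>
    simp only [hlast]
    exact aLoop_eq sm _ H (sm.length + 1) path0 q hlast
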